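-- pv_equiv track=rewrite | github.com/ayushmaanFCB/Solving-Advent-of-Code-2024-in-Python | Day 1.py | compare_list_by_occurences
-- ===== SOURCE A (Python) =====
-- def compare_list_by_occurences(list1=[3,4,2,1,3,3], list2=[4,3,5,3,9,3]):
--     occurences = []
--     for num1 in list1:
--         count = 0
--         for num2 in list2:
--             if num1 == num2:
--                 count += 1
--         occurences.append(num1*count)
--     return sum(occurences)
-- ===== SOURCE B (Python) =====
-- def compare_list_by_occurences(list1=[3,4,2,1,3,3], list2=[4,3,5,3,9,3]):
--     c1 = {}
--     for v in list1:
--         c1[v] = c1.get(v, 0) + 1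
--     c2 = {}
--     for v in list2:
--         c2[v] = c2.get(v, 0) + 1
--     total = 0
--     for v, cnt in c1.items():
--         total += v * cnt * c2.get(v, 0)
--     return total
-- ===== Notes on version B (the rewrite author's own statement) =====
-- stated objective: faster
-- what changed: Replaces the nested scan of list2 for every element of list1 by two frequency tables built in one pass each, summing v * count1(v) * count2(v) over the distinct values of list1.
import Mathlib
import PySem

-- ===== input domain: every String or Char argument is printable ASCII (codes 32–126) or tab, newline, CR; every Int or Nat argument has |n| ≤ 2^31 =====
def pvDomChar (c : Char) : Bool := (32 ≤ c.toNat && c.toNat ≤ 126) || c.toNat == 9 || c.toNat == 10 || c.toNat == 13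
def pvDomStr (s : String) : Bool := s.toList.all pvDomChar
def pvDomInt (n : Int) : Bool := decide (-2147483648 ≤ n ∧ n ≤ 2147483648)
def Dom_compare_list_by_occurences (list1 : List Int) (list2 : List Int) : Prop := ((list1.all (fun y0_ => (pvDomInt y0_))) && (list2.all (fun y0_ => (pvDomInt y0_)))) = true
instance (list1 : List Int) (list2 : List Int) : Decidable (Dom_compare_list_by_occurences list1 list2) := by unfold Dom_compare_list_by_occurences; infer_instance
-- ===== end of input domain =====

-- B replaces A's quadratic nested scan by two one-pass frequency tables and a sum over the
-- distinct values of list1 (objective: faster, asymptotically O(n+m) vs O(n*m)).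

-- ===== PORT A =====
def compare_list_by_occurences (list1 : List Int) (list2 : List Int) : Int :=
  let occurences : List Int :=
    list1.foldl (fun occ num1 =>
      let count : Int :=
        list2.foldl (fun c num2 => if num1 == num2 then c + 1 else c) 0
      occ ++ [num1 * count]) []
  occurences.sum

-- ===== PORT B =====
def compare_list_by_occurences_alt (list1 : List Int) (list2 : List Int) : Int :=
  let c1 : PySem.Dict Int Int :=
    list1.foldl (fun d v => d.insert v (d.getD v 0 + 1)) PySem.Dict.empty
  let c2 : PySem.Dict Int Int :=
    list2.foldl (fun d v => d.insert v (d.getD v 0 + 1)) PySem.Dict.empty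
  c1.items.foldl (fun total p => total + p.1 * p.2 * c2.getD p.1 0) 0

-- ===== PRECONDITION & SPEC =====
def Spec_compare_list_by_occurences (list1 : List Int) (list2 : List Int) (out : Int) : Prop := out = compare_list_by_occurences_alt list1 list2
instance (list1 : List Int) (list2 : List Int) (out : Int) : Decidable (Spec_compare_list_by_occurences list1 list2 out) := by unfold Spec_compare_list_by_occurences; infer_instance

-- ===== CLAIM (what is proved, stated in full; the proofs are below) =====
def Claim_equal_compare_list_by_occurences : Prop := ∀ (list1 : List Int) (list2 : List Int), Dom_compare_list_by_occurences list1 list2 → Spec_compare_list_by_occurences list1 list2 (compare_list_by_occurences list1 list2)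

-- ===== LEMMAS AND PROOFS =====

-- a sum of g over a list is the sum of g weighted by multiplicity over its distinct values
theorem pv_sum_over_distinct (l : List Int) (g : Int → Int) :
    ((PySem.Set.ofList l).map (fun v => g v * l.count v)).sum = (l.map g).sum := by
  have hnd : (PySem.Set.ofList l).Nodup := PySem.Set.nodup_ofList l
  have hfs : (PySem.Set.ofList l).toFinset = l.toFinset := by
    ext x; simp [PySem.Set.mem_ofList]
  rw [← List.sum_toFinset _ hnd, hfs, Finset.sum_list_map_count]
  refine Finset.sum_congr rfl ?_
  intro x hx
  simp; ring

-- A's inner loop over list2 is list2.count num1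
theorem pv_inner_count (l : List Int) (n : Int) :
    l.foldl (fun c x => if n == x then c + 1 else c) (0:Int) = (l.count n : Int) := by
  rw [PySem.List.foldl_count_if, zero_add]
  simp only [List.count_eq_countP]
  congr 1
  exact List.countP_congr (fun x _ => by rw [Bool.beq_comm])

-- ===== VERDICT (by name: the statement is the Claim_ definition above) =====
theorem compare_list_by_occurences_spec : Claim_equal_compare_list_by_occurences := by
  intro list1 list2 _
  unfold Spec_compare_list_by_occurences compare_list_by_occurences compare_list_by_occurences_alt
  simp only [PySem.Dict.foldl_insert_getD_add_one_eq_counter]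
  rw [PySem.List.foldl_append_singleton_eq_map]
  simp only [pv_inner_count, PySem.List.foldl_add, PySem.Dict.items_counter,
    List.map_map, List.nil_append, Function.comp_def, PySem.Dict.getD_counter, zero_add]
  rw [← pv_sum_over_distinct list1 (fun v => v * (list2.count v : Int))]
  congr 1
  refine List.map_congr_left ?_
  intro v hv
  ring
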